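-- pv_equiv track=rewrite | github.com/Iune/melbourne | melbourne/contest/entry.py | _get_dq_statuses
-- ===== SOURCE A (Python) =====
-- from typing import List, Set
--
-- def _get_dq_statuses(votes: List[str]) -> List[bool]:
--     dq_statuses = []
--     is_dq = False
--     for vote in votes:
--         if vote.lower() == "dq":
--             is_dq = True
--         dq_statuses.append(is_dq)
--     return dq_statuses
-- ===== SOURCE B (Python) =====
-- from typing import List
--
-- def _get_dq_statuses(votes: List[str]) -> List[bool]:
--     idx = next((i for i, v in enumerate(votes) if v.lower() == "dq"), len(votes))
--     return [False] * idx + [True] * (len(votes) - idx)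
-- ===== Notes on version B (the rewrite author's own statement) =====
-- stated objective: simpler
-- what changed: Replaces the running-flag pass with find-the-first-'dq'-index then build [False]*idx + [True]*(n-idx) directly.
import Mathlib
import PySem

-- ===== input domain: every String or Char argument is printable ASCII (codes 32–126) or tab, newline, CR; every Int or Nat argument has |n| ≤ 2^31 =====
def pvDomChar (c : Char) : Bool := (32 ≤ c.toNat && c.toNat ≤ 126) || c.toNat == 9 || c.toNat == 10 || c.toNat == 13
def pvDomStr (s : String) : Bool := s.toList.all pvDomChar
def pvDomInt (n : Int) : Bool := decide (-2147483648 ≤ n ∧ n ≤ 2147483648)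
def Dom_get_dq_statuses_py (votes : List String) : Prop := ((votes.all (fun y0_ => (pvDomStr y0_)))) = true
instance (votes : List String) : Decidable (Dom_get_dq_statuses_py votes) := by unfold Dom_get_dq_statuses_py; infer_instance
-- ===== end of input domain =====

-- B replaces A's running-flag single pass by locating the first 'dq' index and building two constant runs; objective: simpler.

-- ===== PORT A =====
-- literal port of the running-flag loop: state = (accumulated list, is_dq flag)
def get_dq_statuses_py (votes : List String) : List Bool :=
  (votes.foldl (fun (st : List Bool × Bool) vote =>
      let is_dq := if PySem.Str.lower vote = "dq" then true else st.2
      (st.1 ++ [is_dq], is_dq)) ([], false)).1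

-- ===== PORT B =====
-- index of the first vote whose lower() is "dq", defaulting to the length
def pvFirstDqIdx : List String → Nat
  | [] => 0
  | v :: rest => if PySem.Str.lower v = "dq" then 0 else 1 + pvFirstDqIdx rest

def get_dq_statuses_py_alt (votes : List String) : List Bool :=
  let idx := pvFirstDqIdx votes
  List.replicate idx false ++ List.replicate (votes.length - idx) true

-- ===== PRECONDITION & SPEC =====
def Spec_get_dq_statuses_py (votes : List String) (out : List Bool) : Prop := out = get_dq_statuses_py_alt votes
instance (votes : List String) (out : List Bool) : Decidable (Spec_get_dq_statuses_py votes out) := by unfold Spec_get_dq_statuses_py; infer_instance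

-- ===== CLAIM (what is proved, stated in full; the proofs are below) =====
def Claim_equal_get_dq_statuses_py : Prop := ∀ (votes : List String), Dom_get_dq_statuses_py votes → Spec_get_dq_statuses_py votes (get_dq_statuses_py votes)

-- ===== LEMMAS AND PROOFS =====

-- what A's loop produces from a given flag: all True once the flag is set, else B's shape
def pvSpecFrom (votes : List String) (flag : Bool) : List Bool :=
  if flag then List.replicate votes.length true else get_dq_statuses_py_alt votes

theorem pvFoldl_spec (votes : List String) (acc : List Bool) (flag : Bool) :
    (votes.foldl (fun (st : List Bool × Bool) vote =>
      let is_dq := if PySem.Str.lower vote = "dq" then true else st.2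
      (st.1 ++ [is_dq], is_dq)) (acc, flag)).1 = acc ++ pvSpecFrom votes flag := by
  induction votes generalizing acc flag with
  | nil => simp [pvSpecFrom, get_dq_statuses_py_alt, pvFirstDqIdx]
  | cons v rest ih =>
    simp only [List.foldl_cons]
    rw [ih]
    by_cases hd : PySem.Str.lower v = "dq" <;> cases flag <;>
      simp [pvSpecFrom, get_dq_statuses_py_alt, pvFirstDqIdx, hd, List.replicate_succ,
        List.append_assoc]
    rw [show rest.length + 1 - (1 + pvFirstDqIdx rest) = rest.length - pvFirstDqIdx rest by omega,
        Nat.add_comm 1 (pvFirstDqIdx rest), List.replicate_succ]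
    simp

theorem get_dq_statuses_py_spec : Claim_equal_get_dq_statuses_py := by
  intro votes _
  unfold Spec_get_dq_statuses_py get_dq_statuses_py
  rw [pvFoldl_spec]
  cases votes <;> simp [pvSpecFrom, get_dq_statuses_py_alt]
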